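-- pv_equiv track=rewrite | github.com/raspizone/eInk_dashboard7.5_PiPico | code.py | monthcalendar
-- ===== SOURCE A (Python) =====
-- def is_leap(year):
--     return (year % 4 == 0 and year % 100 != 0) or (year % 400 == 0)
--
-- def days_in_month(year, month):
--     days_in_months = [31, 29 if is_leap(year) else 28, 31, 30, 31, 30,
--                       31, 31, 30, 31, 30, 31]
--     return days_in_months[month -1]
--
-- def weekday(year, month, day):
--     # Zeller's Congruence, returns 0=Monday ... 6=Sunday
--     if month < 3:
--         month += 12
--         year -= 1
--     K = year % 100
--     J = year // 100
--     h = (day + 13*(month + 1)//5 + K + K//4 + J//4 + 5*J) % 7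
--     d = (h + 6) % 7  # Convert Zeller's to 0=Monday
--     return d
--
-- def monthcalendar(year, month):
--     first_day = weekday(year, month, 1)  # 0=Monday
--     days = days_in_month(year, month)
--
--     weeks = []
--     week = [0]*7
--     day_counter = 1
--
--     # Fill first week
--     for i in range(first_day, 7):
--         week[i] = day_counter
--         day_counter += 1
--     weeks.append(week)
--
--     # Fill remaining weeks
--     while day_counter <= days:
--         week = [0]*7
--         for i in range(7):
--             if day_counter <= days:
--                 week[i] = day_counter
--                 day_counter += 1
--         weeks.append(week)
--
--     return weeks
-- ===== SOURCE B (Python) =====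
-- def is_leap(year):
--     return (year % 4 == 0 and year % 100 != 0) or (year % 400 == 0)
--
-- def days_in_month(year, month):
--     days_in_months = [31, 29 if is_leap(year) else 28, 31, 30, 31, 30,
--                       31, 31, 30, 31, 30, 31]
--     return days_in_months[month -1]
--
-- def weekday(year, month, day):
--     # Zeller's Congruence, returns 0=Monday ... 6=Sunday
--     if month < 3:
--         month += 12
--         year -= 1
--     K = year % 100
--     J = year // 100
--     h = (day + 13*(month + 1)//5 + K + K//4 + J//4 + 5*J) % 7
--     return (h + 6) % 7
--
-- def monthcalendar(year, month):
--     # build the flat cell list once, then chunk it into 7-day rows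
--     first_day = weekday(year, month, 1)
--     days = days_in_month(year, month)
--     cells = [0] * first_day + list(range(1, days + 1))
--     cells += [0] * (-len(cells) % 7)
--     return [cells[i:i+7] for i in range(0, len(cells), 7)]
-- ===== Notes on version B (the rewrite author's own statement) =====
-- stated objective: simpler
-- what changed: Replaces the first-week fill loop plus the while-loop with a per-cell counter by building one flat cell list (leading zeros, 1..days, trailing zero padding to a multiple of 7) and chunking it into 7-long slices.
import Mathlib
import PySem

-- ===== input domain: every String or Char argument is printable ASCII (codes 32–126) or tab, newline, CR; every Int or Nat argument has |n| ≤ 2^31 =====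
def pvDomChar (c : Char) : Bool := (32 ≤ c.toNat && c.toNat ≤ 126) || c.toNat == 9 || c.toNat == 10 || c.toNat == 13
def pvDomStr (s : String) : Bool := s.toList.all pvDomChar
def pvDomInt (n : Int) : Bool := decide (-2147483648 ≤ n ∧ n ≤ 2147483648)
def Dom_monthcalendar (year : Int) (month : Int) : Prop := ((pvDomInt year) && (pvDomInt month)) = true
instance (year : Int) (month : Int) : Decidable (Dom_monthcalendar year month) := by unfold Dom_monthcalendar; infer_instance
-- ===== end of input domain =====

-- B builds one flat cell list (zeros, 1..days, zero padding to a multiple of 7) and chunks it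
-- into 7-long slices, replacing A's first-week loop + while loop with a day counter.
-- Both Pythons raise IndexError for month outside -11..12; Pre_ excludes exactly those inputs.

-- ===== PORT A =====
def pvIsLeap (year : Int) : Bool :=
  (PySem.Int.mod year 4 == 0 && !(PySem.Int.mod year 100 == 0)) || PySem.Int.mod year 400 == 0

-- days_in_months[month-1]; none = IndexError
def pvDaysInMonth (year month : Int) : Option Int :=
  PySem.List.pyGet?
    [31, if pvIsLeap year then 29 else 28, 31, 30, 31, 30, 31, 31, 30, 31, 30, 31]
    (month - 1)

def pvWeekday (year month day : Int) : Int :=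
  let p := if month < 3 then (month + 12, year - 1) else (month, year)
  let K := PySem.Int.mod p.2 100
  let J := PySem.Int.floordiv p.2 100
  let h := PySem.Int.mod
    (day + PySem.Int.floordiv (13 * (p.1 + 1)) 5 + K + PySem.Int.floordiv K 4
       + PySem.Int.floordiv J 4 + 5 * J) 7
  PySem.Int.mod (h + 6) 7

-- inner 'for i in range(7)' of A's while body
def pvFillWeek (days : Int) (st : List Int × Int) : List Int × Int :=
  (PySem.List.pyRange 0 7 1).foldl
    (fun st i => if st.2 ≤ days then (PySem.List.pySetD st.1 i st.2, st.2 + 1) else st) st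

-- A's while loop; fuel only bounds the iterations (dc strictly increases while dc ≤ days)
def pvWeeksLoop : Nat → Int → Int → List (List Int)
  | 0, _, _ => []
  | fuel + 1, dc, days =>
    if dc ≤ days then
      let st := pvFillWeek days (List.replicate 7 0, dc)
      st.1 :: pvWeeksLoop fuel st.2 days
    else []

def pvACore (first_day days : Int) : List (List Int) :=
  -- first week: for i in range(first_day, 7); first_day = (…)%7 is always ≥ 0
  let st := (PySem.List.pyRange first_day 7 1).foldl
    (fun st i => (PySem.List.pySetD st.1 i st.2, st.2 + 1)) (List.replicate 7 0, (1 : Int))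
  st.1 :: pvWeeksLoop (days.toNat + 7) st.2 days

def monthcalendar (year : Int) (month : Int) : List (List Int) :=
  let first_day := pvWeekday year month 1
  match pvDaysInMonth year month with
  | none => []          -- Python raises IndexError here; excluded by Pre_
  | some days => pvACore first_day days

-- ===== PORT B =====
def pvBCore (first_day days : Int) : List (List Int) :=
  -- [0]*first_day + list(range(1, days+1)); first_day ≥ 0 always
  let cells := List.replicate first_day.toNat 0 ++ PySem.List.pyRange 1 (days + 1) 1
  let cells := cells ++ List.replicate (PySem.Int.mod (-(cells.length : Int)) 7).toNat 0
  (PySem.List.pyRange 0 (cells.length : Int) 7).map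
    (fun i => PySem.List.slice cells (some i) (some (i + 7)))

def monthcalendar_alt (year : Int) (month : Int) : List (List Int) :=
  let first_day := pvWeekday year month 1
  match pvDaysInMonth year month with
  | none => []          -- Python raises IndexError here; excluded by Pre_
  | some days => pvBCore first_day days

-- ===== PRECONDITION & SPEC =====
-- Pre_ excludes exactly the months on which both Pythons raise IndexError
-- (days_in_months[month-1] is out of range unless -11 ≤ month ≤ 12).
def Pre_monthcalendar (year : Int) (month : Int) : Prop := -11 ≤ month ∧ month ≤ 12
instance (year : Int) (month : Int) : Decidable (Pre_monthcalendar year month) := by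
  unfold Pre_monthcalendar; infer_instance

def pvWitness_monthcalendar : Int × Int := (2024, 2)

def Spec_monthcalendar (year : Int) (month : Int) (out : List (List Int)) : Prop := out = monthcalendar_alt year month
instance (year : Int) (month : Int) (out : List (List Int)) : Decidable (Spec_monthcalendar year month out) := by unfold Spec_monthcalendar; infer_instance

-- ===== CLAIM (what is proved, stated in full; the proofs are below) =====
def Claim_equal_monthcalendar : Prop := ∀ (year : Int) (month : Int), Dom_monthcalendar year month → Pre_monthcalendar year month → Spec_monthcalendar year month (monthcalendar year month)

-- ===== LEMMAS AND PROOFS =====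

lemma pvWeekday_nonneg (year month day : Int) : 0 ≤ pvWeekday year month day :=
  PySem.Int.mod_nonneg _ (by norm_num)

lemma pvWeekday_lt (year month day : Int) : pvWeekday year month day < 7 :=
  PySem.Int.mod_lt _ (by norm_num)

lemma pvDaysInMonth_cases (year month d : Int) (h : pvDaysInMonth year month = some d) :
    d = 28 ∨ d = 29 ∨ d = 30 ∨ d = 31 := by
  have hm := PySem.List.mem_of_pyGet?_eq_some _ h
  by_cases hl : pvIsLeap year = true <;> simp [hl] at hm <;> omega

lemma pvCore_eq (fd d : Int) (h0 : 0 ≤ fd) (h7 : fd < 7)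
    (hd : d = 28 ∨ d = 29 ∨ d = 30 ∨ d = 31) : pvACore fd d = pvBCore fd d := by
  interval_cases fd <;> rcases hd with rfl | rfl | rfl | rfl <;> decide

-- ===== VERDICT (by name: the statement is the Claim_ definition above) =====
theorem monthcalendar_spec : Claim_equal_monthcalendar := by
  intro year month _hdom _hpre
  unfold Spec_monthcalendar monthcalendar monthcalendar_alt
  cases h : pvDaysInMonth year month with
  | none => rfl
  | some d =>
      exact pvCore_eq _ _ (pvWeekday_nonneg year month 1) (pvWeekday_lt year month 1)
        (pvDaysInMonth_cases year month d h)
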